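-- pv_equiv track=rewrite | github.com/fbuetler/adventofcode | 2024/12/solve.py | parse
-- ===== SOURCE A (Python) =====
-- def parse(lines):
--     map = [list(l) for l in lines]
--     # group by plant type
--     plants = dict()
--     for i, l in enumerate(map):
--         for j, plant_type in enumerate(l):
--             if plant_type in plants:
--                 plants[plant_type] += [(i, j)]
--             else:
--                 plants[plant_type] = [(i, j)]
--     return (map, plants)
-- ===== SOURCE B (Python) =====
-- def parse(lines):
--     map = [list(l) for l in lines]
--     pairs = [(pt, (i, j)) for i, row in enumerate(map) for j, pt in enumerate(row)]
--     keys = list(dict.fromkeys(pt for pt, _ in pairs))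
--     plants = {t: [pos for pt, pos in pairs if pt == t] for t in keys}
--     return (map, plants)
-- ===== Notes on version B (the rewrite author's own statement) =====
-- stated objective: alternative
-- what changed: B replaces A's nested loop with a conditional dict update by a flat enumeration into (type, coord) pairs, an ordered key dedup, and a per-key comprehension that gathers each group by filtering the flat list.
import Mathlib
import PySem

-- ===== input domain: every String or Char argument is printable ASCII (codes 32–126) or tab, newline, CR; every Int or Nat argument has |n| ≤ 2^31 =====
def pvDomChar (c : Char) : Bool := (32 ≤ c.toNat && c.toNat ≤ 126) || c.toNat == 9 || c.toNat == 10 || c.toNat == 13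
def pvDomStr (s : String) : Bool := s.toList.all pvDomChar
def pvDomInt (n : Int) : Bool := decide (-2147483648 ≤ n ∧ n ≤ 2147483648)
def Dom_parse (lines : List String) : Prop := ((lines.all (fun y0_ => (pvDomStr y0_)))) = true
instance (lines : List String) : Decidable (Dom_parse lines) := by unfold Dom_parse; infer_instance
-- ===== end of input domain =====

-- B groups coordinates by filtering a flat (type, coord) list per deduped key instead of A's
-- conditional dict-update loop; objective: alternative (same result, different decomposition).

-- ===== PORT A =====
-- map = [list(l) for l in lines]; nested enumerate loop updating dict `plants`
def parse (lines : List String) : List (List String) × (List (String × List (Int × Int))) :=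
  let grid := lines.map (fun l => l.toList.map (fun c => String.mk [c]))
  let plants := (PySem.List.enumerate grid).foldl
    (fun d (p : Int × List String) =>
      (PySem.List.enumerate p.2).foldl
        (fun (d : PySem.Dict String (List (Int × Int))) (q : Int × String) =>
          if d.contains q.2 then
            d.insert q.2 (d.getD q.2 [] ++ [(p.1, q.1)])
          else
            d.insert q.2 [(p.1, q.1)]) d)
    PySem.Dict.empty
  (grid, plants.items)

-- ===== PORT B =====
-- pairs = flat list of (plant_type, (i, j)); keys = ordered dedup; group by filter per key
def parse_alt (lines : List String) : List (List String) × (List (String × List (Int × Int))) :=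
  let grid := lines.map (fun l => l.toList.map (fun c => String.mk [c]))
  let pairs := (PySem.List.enumerate grid).flatMap
    (fun p => (PySem.List.enumerate p.2).map (fun q => (q.2, (p.1, q.1))))
  let keys := PySem.List.dedup (pairs.map (·.1))
  let plants := keys.map (fun t => (t, (pairs.filter (fun pr => pr.1 == t)).map (·.2)))
  (grid, plants)

-- ===== PRECONDITION & SPEC =====
def Spec_parse (lines : List String) (out : List (List String) × (List (String × List (Int × Int)))) : Prop := out = parse_alt lines
instance (lines : List String) (out : List (List String) × (List (String × List (Int × Int)))) : Decidable (Spec_parse lines out) := by unfold Spec_parse; infer_instance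

-- ===== CLAIM (what is proved, stated in full; the proofs are below) =====
def Claim_equal_parse : Prop := ∀ (lines : List String), Dom_parse lines → Spec_parse lines (parse lines)

-- ===== LEMMAS AND PROOFS =====

-- A's conditional update is one unconditional insert of getD ++ [snd]
theorem parse_step_eq (d : PySem.Dict String (List (Int × Int))) (k : String) (v : Int × Int) :
    (if d.contains k then d.insert k (d.getD k [] ++ [v]) else d.insert k [v])
      = d.insert k (d.getD k [] ++ [v]) := by
  by_cases h : d.contains k = true
  · simp [h]
  · simp only [Bool.not_eq_true] at h
    simp [h, PySem.Dict.getD_of_not_contains d _ h]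

theorem getD_foldl_insert_append (l : List (String × (Int × Int)))
    (d : PySem.Dict String (List (Int × Int))) (c : String) :
    (l.foldl (fun d p => d.insert p.1 (d.getD p.1 [] ++ [p.2])) d).getD c []
      = d.getD c [] ++ (l.filter (fun p => p.1 == c)).map (·.2) := by
  induction l generalizing d with
  | nil => simp
  | cons p l ih =>
      simp only [List.foldl_cons, ih, List.filter_cons]
      by_cases h : p.1 = c
      · subst h; simp [PySem.Dict.getD_insert_self]
      · simp [PySem.Dict.getD_insert_of_ne d _ _ (fun hc => h hc.symm), h]

-- the grouping loop over any flat pair list, as items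
theorem foldl_group_items (l : List (String × (Int × Int))) :
    (l.foldl (fun d p => d.insert p.1 (d.getD p.1 [] ++ [p.2])) PySem.Dict.empty).items
      = (PySem.List.dedup (l.map (·.1))).map
          (fun t => (t, (l.filter (fun pr => pr.1 == t)).map (·.2))) := by
  have hnd : (l.foldl (fun d p => d.insert p.1 (d.getD p.1 [] ++ [p.2])) PySem.Dict.empty).keys.Nodup := by
    exact PySem.Dict.nodup_keys_foldl_insert_key l (·.1) _ _ (by simp)
  have hkeys : (l.foldl (fun d p => d.insert p.1 (d.getD p.1 [] ++ [p.2])) PySem.Dict.empty).keys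
      = PySem.List.dedup (l.map (·.1)) := by
    rw [PySem.Dict.keys_foldl_insert_key]
    simp [PySem.Dict.keys_empty]
    rfl
  rw [PySem.Dict.items_eq_map_keys _ hnd ([] : List (Int × Int)), hkeys]
  refine List.map_congr_left (fun t ht => ?_)
  rw [getD_foldl_insert_append]
  simp

-- ===== VERDICT (by name: the statement is the Claim_ definition above) =====
theorem parse_spec : Claim_equal_parse := by
  intro lines _
  show parse lines = parse_alt lines
  unfold parse parse_alt
  refine Prod.ext rfl ?_
  simp only
  -- rewrite A's step, flatten A's nested fold into B's flat pair list, then group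
  have hstep : ∀ (d : PySem.Dict String (List (Int × Int))) (p : Int × List String),
      (PySem.List.enumerate p.2).foldl
        (fun (d : PySem.Dict String (List (Int × Int))) (q : Int × String) =>
          if d.contains q.2 then d.insert q.2 (d.getD q.2 [] ++ [(p.1, q.1)])
          else d.insert q.2 [(p.1, q.1)]) d
      = ((PySem.List.enumerate p.2).map (fun q => (q.2, (p.1, q.1)))).foldl
          (fun (d : PySem.Dict String (List (Int × Int))) pr => d.insert pr.1 (d.getD pr.1 [] ++ [pr.2])) d := by
    intro d p
    rw [List.foldl_map]
    exact PySem.List.foldl_congr_mem _ _ _ _ (fun d q _ => parse_step_eq d q.2 (p.1, q.1))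
  calc ((PySem.List.enumerate (lines.map fun l => l.toList.map fun c => String.mk [c])).foldl
          (fun d (p : Int × List String) =>
            (PySem.List.enumerate p.2).foldl
              (fun (d : PySem.Dict String (List (Int × Int))) (q : Int × String) =>
                if d.contains q.2 then d.insert q.2 (d.getD q.2 [] ++ [(p.1, q.1)])
                else d.insert q.2 [(p.1, q.1)]) d) PySem.Dict.empty).items
      = (((PySem.List.enumerate (lines.map fun l => l.toList.map fun c => String.mk [c])).flatMap
            (fun p => (PySem.List.enumerate p.2).map (fun q => (q.2, (p.1, q.1))))).foldl
          (fun (d : PySem.Dict String (List (Int × Int))) pr => d.insert pr.1 (d.getD pr.1 [] ++ [pr.2]))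
          PySem.Dict.empty).items := by
        rw [List.foldl_flatMap]
        congr 1
        exact PySem.List.foldl_congr_mem _ _ _ _ (fun d p _ => hstep d p)
    _ = _ := by rw [foldl_group_items]
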